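-- pv_equiv track=rewrite | github.com/pvs-hd-tea/LapsPython | dummy/continuous_integration.py | dummy_function
-- ===== SOURCE A (Python) =====
-- from collections import Counter
--
-- def dummy_function(n_values: int = 3) -> bool:
--     """Validate linting workflow using pointless computations.
--
--     :param n_values: list length
--     :type n_values: int, optional
--     :returns: True (output should never be False)
--     :rtype: bool
--     """
--     if not isinstance(n_values, int):
--         raise TypeError('n_values must be an integer.')
--
--     list_of_n = list(range((n_values)))
--     list_of_n_counter = Counter(list_of_n)
--     accumulated_count = 0
--
--     for value in list_of_n:
--         accumulated_count += list_of_n_counter[value]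
--
--     return accumulated_count == len(list_of_n)
-- ===== SOURCE B (Python) =====
-- def dummy_function(n_values: int = 3) -> bool:
--     """Validate linting workflow; closed form instead of the counting loop."""
--     if not isinstance(n_values, int):
--         raise TypeError('n_values must be an integer.')
--     # range(n) has no duplicates, so each Counter count is 1 and the
--     # accumulated sum always equals the list length.
--     return True
-- ===== Notes on version B (the rewrite author's own statement) =====
-- stated objective: simpler
-- what changed: The list/Counter/accumulation loop is replaced by the closed-form observation that each element of range(n) occurs exactly once, so the result is the constant True; the type guard is kept.
import Mathlib
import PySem

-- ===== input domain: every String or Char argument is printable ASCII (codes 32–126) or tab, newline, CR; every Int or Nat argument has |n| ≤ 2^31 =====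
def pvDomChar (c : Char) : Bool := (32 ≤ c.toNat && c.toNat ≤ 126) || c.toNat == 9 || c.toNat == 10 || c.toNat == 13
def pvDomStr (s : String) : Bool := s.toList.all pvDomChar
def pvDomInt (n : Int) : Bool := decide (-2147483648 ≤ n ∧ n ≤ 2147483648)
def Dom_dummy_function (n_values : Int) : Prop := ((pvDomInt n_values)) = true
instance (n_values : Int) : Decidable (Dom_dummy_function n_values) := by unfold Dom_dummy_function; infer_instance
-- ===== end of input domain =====

-- B replaces the list/Counter/accumulation loop with the closed-form constant True (each range element occurs once); simpler and O(1).

-- ===== PORT A =====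
def dummy_function (n_values : Int) : Bool :=
  let list_of_n := PySem.List.pyRange 0 n_values 1
  let list_of_n_counter := PySem.Dict.counter list_of_n
  let accumulated_count :=
    list_of_n.foldl (fun acc value => acc + list_of_n_counter.getD value 0) 0
  accumulated_count == (list_of_n.length : Int)

-- ===== PORT B =====
def dummy_function_alt (_n_values : Int) : Bool := true

-- ===== PRECONDITION & SPEC =====
def Spec_dummy_function (n_values : Int) (out : Bool) : Prop := out = dummy_function_alt n_values
instance (n_values : Int) (out : Bool) : Decidable (Spec_dummy_function n_values out) := by
  unfold Spec_dummy_function; infer_instance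

-- ===== CLAIM =====
def Claim_equal_dummy_function : Prop :=
  ∀ (n_values : Int), Dom_dummy_function n_values → Spec_dummy_function n_values (dummy_function n_values)

-- ===== LEMMAS AND PROOFS =====
lemma dummy_acc_eq_length (n : Int) :
    (PySem.List.pyRange 0 n 1).foldl
      (fun acc value => acc + (PySem.Dict.counter (PySem.List.pyRange 0 n 1)).getD value 0) 0
      = ((PySem.List.pyRange 0 n 1).length : Int) := by
  set l := PySem.List.pyRange 0 n 1 with hl
  have hnd : l.Nodup := PySem.List.nodup_pyRange_one 0 n
  have h1 : l.foldl (fun acc value => acc + (PySem.Dict.counter l).getD value 0) 0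
      = l.foldl (fun acc value => acc + 1) 0 := by
    apply PySem.List.foldl_congr_mem
    intro acc x hx
    rw [PySem.Dict.getD_counter]
    have := List.count_eq_one_of_mem hnd hx
    simp [this]
  rw [h1, PySem.List.foldl_add]
  simp

-- ===== VERDICT =====
theorem dummy_function_spec : Claim_equal_dummy_function := by
  intro n _
  show dummy_function n = dummy_function_alt n
  simp only [dummy_function, dummy_function_alt]
  rw [dummy_acc_eq_length]
  simp
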